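-- pv_equiv track=rewrite | github.com/VIB-PSB/cross_species_annotation_transfer | bin/significance_deg_overlap.py | remove_two_way_redundancy
-- ===== SOURCE A (Python) =====
-- def remove_two_way_redundancy(all_comparisons):
--
--     """
--     Remove the two-way redundancy in the comparisons (remove the reverse comparison).
--
--     Parameters:
--         all_comparisons (iterable): An iterable containing all comparisons.
--
--     Returns:
--         unique_comparison_couples (list): A list of unique comparison couples with redundancy removed.
--     """
--
--     remaining_comparisons = set(all_comparisons)
--     unique_comparison_couples = list()
--
--     for comparison in all_comparisons:
--
--         # If in remaining comparisons, add to list and remove from remaining comparisons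
--         if comparison in remaining_comparisons:
--             unique_comparison_couples.append(comparison)
--             remaining_comparisons.remove(comparison)
--
--         # Remove the reverse comparison from remaining comparisons
--         species1, species2 = comparison.split("-to-")
--         comparison_reverse = species2 + "-to-" + species1
--         if comparison_reverse in remaining_comparisons:
--             remaining_comparisons.remove(comparison_reverse)
--
--     return unique_comparison_couples
-- ===== SOURCE B (Python) =====
-- def remove_two_way_redundancy(all_comparisons):
--     """Staged passes instead of a mutated candidate set: pass 1 indexes the first
--     occurrence of every comparison and of every reverse form; pass 2 keeps a
--     comparison exactly when its index beats both indices.  Return value only;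
--     equals A on lists of well-formed comparison strings."""
--     first = {}
--     first_rev = {}
--     for i, comparison in enumerate(all_comparisons):
--         species1, species2 = comparison.split("-to-")
--         first.setdefault(comparison, i)
--         first_rev.setdefault(species2 + "-to-" + species1, i)
--     return [comparison for i, comparison in enumerate(all_comparisons)
--             if first[comparison] == i and first_rev.get(comparison, i) >= i]
-- ===== Notes on version B (the rewrite author's own statement) =====
-- stated objective: alternative
-- what changed: A makes one pass that mutates a pre-built candidate set (emitting a comparison while deleting it and its reverse); B uses staged passes over immutable indices: pass 1 records the first index of every comparison and of every reverse form in two dicts, pass 2 filters by comparing each position against those indices.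
import Mathlib
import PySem

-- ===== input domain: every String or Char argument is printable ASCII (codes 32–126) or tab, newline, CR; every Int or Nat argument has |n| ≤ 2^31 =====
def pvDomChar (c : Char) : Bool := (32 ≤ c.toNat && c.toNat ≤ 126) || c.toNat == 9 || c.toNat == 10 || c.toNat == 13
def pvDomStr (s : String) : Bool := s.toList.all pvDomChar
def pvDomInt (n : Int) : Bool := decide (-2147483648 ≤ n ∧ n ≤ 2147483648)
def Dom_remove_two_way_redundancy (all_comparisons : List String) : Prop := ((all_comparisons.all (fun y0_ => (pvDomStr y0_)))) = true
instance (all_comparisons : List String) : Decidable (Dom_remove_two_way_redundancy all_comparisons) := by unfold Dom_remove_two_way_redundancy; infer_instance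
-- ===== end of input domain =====

-- B replaces A's single pass over a mutated candidate set by two staged passes: index the first
-- occurrence of every comparison and of every reverse form, then filter by index comparison
-- (alternative decomposition; return value only).

-- ===== PORT A =====
-- loop of A: state = (remaining_comparisons, unique_comparison_couples)
def remove_two_way_redundancy_go (remaining : PySem.Set String) (acc : List String) :
    List String → List String
  | [] => acc
  | comparison :: rest =>
    let st :=
      if PySem.Set.contains remaining comparison then
        (PySem.Set.discard remaining comparison, acc ++ [comparison])
      else (remaining, acc)
    match PySem.Str.split? comparison "-to-" with
    | some [species1, species2] =>
      let rev := species2 ++ "-to-" ++ species1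
      let remaining' :=
        if PySem.Set.contains st.1 rev then PySem.Set.discard st.1 rev else st.1
      remove_two_way_redundancy_go remaining' st.2 rest
    | _ => st.2   -- Python raises ValueError here (unpack of ≠ 2 parts); excluded by Pre_

def remove_two_way_redundancy (all_comparisons : List String) : List String :=
  remove_two_way_redundancy_go (PySem.Set.ofList all_comparisons) [] all_comparisons

-- ===== PORT B =====
-- pass 1 of B: build first[comparison] and first_rev[reverse form] (setdefault = keep first index)
def remove_two_way_redundancy_alt_pass1 :
    List String → Int → PySem.Dict String Int → PySem.Dict String Int →
      PySem.Dict String Int × PySem.Dict String Int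
  | [], _, first, first_rev => (first, first_rev)
  | comparison :: rest, i, first, first_rev =>
    match PySem.Str.split? comparison "-to-" with
    | some [species1, species2] =>
      remove_two_way_redundancy_alt_pass1 rest (i + 1)
        (first.setdefault comparison i)
        (first_rev.setdefault (species2 ++ "-to-" ++ species1) i)
    | _ => (first, first_rev)   -- Python raises ValueError here; excluded by Pre_

-- pass 2 of B: the list comprehension, filtering by index comparison
def remove_two_way_redundancy_alt_pass2 (first first_rev : PySem.Dict String Int) :
    List String → Int → List String
  | [], _ => []
  | comparison :: rest, i =>
    match first.get? comparison with
    | some j =>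
      (if j == i && decide (first_rev.getD comparison i ≥ i) then [comparison] else []) ++
        remove_two_way_redundancy_alt_pass2 first first_rev rest (i + 1)
    | none => []   -- Python raises KeyError here; unreachable under Pre_

def remove_two_way_redundancy_alt (all_comparisons : List String) : List String :=
  let d := remove_two_way_redundancy_alt_pass1 all_comparisons 0 PySem.Dict.empty PySem.Dict.empty
  remove_two_way_redundancy_alt_pass2 d.1 d.2 all_comparisons 0

-- ===== PRECONDITION & SPEC =====
-- Exactly the inputs on which Python A returns: every comparison splits on "-to-" into
-- exactly two pieces (otherwise the unpacking 'species1, species2 = …' raises ValueError).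
def Pre_remove_two_way_redundancy (all_comparisons : List String) : Prop :=
  ∀ c ∈ all_comparisons, ((PySem.Str.split? c "-to-").getD []).length = 2
instance (all_comparisons : List String) : Decidable (Pre_remove_two_way_redundancy all_comparisons) := by unfold Pre_remove_two_way_redundancy; infer_instance

def pvWitness_remove_two_way_redundancy : List String :=
  ["a-to-b", "b-to-a", "a-to-b", "c-to-c", "b-to-c"]

def Spec_remove_two_way_redundancy (all_comparisons : List String) (out : List String) : Prop := out = remove_two_way_redundancy_alt all_comparisons
instance (all_comparisons : List String) (out : List String) : Decidable (Spec_remove_two_way_redundancy all_comparisons out) := by unfold Spec_remove_two_way_redundancy; infer_instance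

-- ===== CLAIM (what is proved, stated in full; the proofs are below) =====
def Claim_equal_remove_two_way_redundancy : Prop := ∀ (all_comparisons : List String), Dom_remove_two_way_redundancy all_comparisons → Pre_remove_two_way_redundancy all_comparisons → Spec_remove_two_way_redundancy all_comparisons (remove_two_way_redundancy all_comparisons)

-- ===== LEMMAS AND PROOFS =====

-- the reverse form of a comparison, when it splits into exactly two pieces
def pvRev? (c : String) : Option String :=
  match PySem.Str.split? c "-to-" with
  | some [s1, s2] => some (s2 ++ "-to-" ++ s1)
  | _ => none

-- "c survives the processed prefix P": no earlier equal comparison, no earlier reverse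
def pvCond (P : List String) (c : String) : Bool :=
  P.all (fun d => !(d == c) && !(pvRev? d == some c))

-- reference single characterization both ports are reduced to (P = reversed processed prefix)
def pvRef (P : List String) : List String → List String
  | [] => []
  | c :: rest => (if pvCond P c then [c] else []) ++ pvRef (c :: P) rest

-- first index ≥ i (counting from i) of an element of l satisfying p
def pvFirstAt? (p : String → Bool) : List String → Int → Option Int
  | [], _ => none
  | c :: rest, i => if p c then some i else pvFirstAt? p rest (i + 1)

lemma pvFirstAt?_append (p : String → Bool) (A B : List String) (i : Int) :
    pvFirstAt? p (A ++ B) i =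
      (pvFirstAt? p A i).orElse (fun _ => pvFirstAt? p B (i + A.length)) := by
  induction A generalizing i with
  | nil => simp [pvFirstAt?]
  | cons a A ih =>
    by_cases h : p a <;> simp [pvFirstAt?, h, ih, Option.orElse, add_comm, add_left_comm]

lemma pvFirstAt?_lt (p : String → Bool) (l : List String) (i k : Int)
    (h : pvFirstAt? p l i = some k) : k < i + l.length := by
  induction l generalizing i with
  | nil => simp [pvFirstAt?] at h
  | cons c rest ih =>
    simp only [pvFirstAt?] at h
    split at h
    · cases h; simp only [List.length_cons]; push_cast; omega
    · have := ih (i + 1) h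
      simp only [List.length_cons]
      push_cast
      omega

lemma pvFirstAt?_ge (p : String → Bool) (l : List String) (i k : Int)
    (h : pvFirstAt? p l i = some k) : i ≤ k := by
  induction l generalizing i with
  | nil => simp [pvFirstAt?] at h
  | cons c rest ih =>
    simp only [pvFirstAt?] at h
    split at h
    · cases h; omega
    · have := ih (i + 1) h; omega

lemma pvFirstAt?_eq_none_iff (p : String → Bool) (l : List String) (i : Int) :
    pvFirstAt? p l i = none ↔ ∀ d ∈ l, p d = false := by
  induction l generalizing i with
  | nil => simp [pvFirstAt?]
  | cons c rest ih =>
    by_cases h : p c <;> simp [pvFirstAt?, h, ih]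

-- membership through A's guarded removal
lemma mem_discard_if (s : PySem.Set String) (v x : String) :
    x ∈ (if PySem.Set.contains s v then PySem.Set.discard s v else s) ↔ x ∈ s ∧ x ≠ v := by
  split_ifs with hv
  · exact PySem.Set.mem_discard s v x
  · rw [PySem.Set.contains_iff s v] at hv
    constructor
    · intro hx
      exact ⟨hx, fun he => hv (he ▸ hx)⟩
    · exact fun h => h.1

-- A's loop equals pvRef under the invariant "remaining = survivors of P"
lemma goA_eq_ref (l P : List String) (remaining : PySem.Set String) (acc : List String)
    (hpre : ∀ c ∈ l, (pvRev? c).isSome)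
    (hinv : ∀ x ∈ l, PySem.Set.contains remaining x = pvCond P x) :
    remove_two_way_redundancy_go remaining acc l = acc ++ pvRef P l := by
  induction l generalizing remaining acc P with
  | nil => simp [remove_two_way_redundancy_go, pvRef]
  | cons c rest ih =>
    have hc := hpre c (List.mem_cons_self ..)
    unfold pvRev? at hc
    cases hsp : PySem.Str.split? c "-to-" with
    | none => rw [hsp] at hc; simp at hc
    | some parts =>
      rw [hsp] at hc
      match parts, hc with
      | [s1, s2], _ =>
        have hrev : pvRev? c = some (s2 ++ "-to-" ++ s1) := by unfold pvRev?; rw [hsp]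
        have hcont := hinv c (List.mem_cons_self ..)
        have hinv' : ∀ x ∈ rest, x ∈ remaining ↔ pvCond P x = true := by
          intro x hx
          rw [← PySem.Set.contains_iff, hinv x (List.mem_cons_of_mem _ hx)]
        have hnext : ∀ (s : PySem.Set String), (∀ x, x ∈ s ↔ x ∈ remaining ∧ x ≠ c) →
            ∀ x ∈ rest, PySem.Set.contains
              (if PySem.Set.contains s (s2 ++ "-to-" ++ s1) then
                PySem.Set.discard s (s2 ++ "-to-" ++ s1) else s) x = pvCond (c :: P) x := by
          intro s hs x hx
          rw [Bool.eq_iff_iff, PySem.Set.contains_iff, mem_discard_if, hs]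
          simp only [pvCond, List.all_cons, Bool.and_eq_true, Bool.not_eq_eq_eq_not,
            Bool.not_true, beq_eq_false_iff_ne, ne_eq, hrev, Option.some.injEq]
          rw [← pvCond, ← hinv' x hx]
          constructor
          · rintro ⟨⟨h1, h2⟩, h3⟩; exact ⟨⟨fun he => h2 he.symm, fun he => h3 he.symm⟩, h1⟩
          · rintro ⟨⟨h2, h3⟩, h1⟩; exact ⟨⟨h1, fun he => h2 he.symm⟩, fun he => h3 he.symm⟩
        by_cases hP : pvCond P c = true
        · rw [hP] at hcont
          simp only [remove_two_way_redundancy_go, hsp, hcont, if_true, pvRef, hP]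
          rw [ih (c :: P) _ (acc ++ [c]) (fun d hd => hpre d (List.mem_cons_of_mem _ hd))
            (hnext _ (fun x => PySem.Set.mem_discard remaining c x))]
          simp
        · rw [Bool.not_eq_true] at hP
          rw [hP] at hcont
          simp only [remove_two_way_redundancy_go, hsp, hcont, Bool.false_eq_true, if_false,
            pvRef, hP]
          have hsid : ∀ x, x ∈ remaining ↔ x ∈ remaining ∧ x ≠ c := by
            intro x
            constructor
            · intro hx
              refine ⟨hx, fun he => ?_⟩
              subst he
              rw [← PySem.Set.contains_iff, hcont] at hx
              exact absurd hx (by simp)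
            · exact fun h => h.1
          rw [ih (c :: P) _ acc (fun d hd => hpre d (List.mem_cons_of_mem _ hd)) (hnext _ hsid)]
          simp

-- pass1's first dict: get? x = first index of x
lemma pass1_fst_get (l : List String) (i : Int) (f fr : PySem.Dict String Int)
    (hpre : ∀ c ∈ l, (pvRev? c).isSome) (x : String) :
    ((remove_two_way_redundancy_alt_pass1 l i f fr).1).get? x =
      (f.get? x).orElse (fun _ => pvFirstAt? (· == x) l i) := by
  induction l generalizing i f fr with
  | nil => cases h : f.get? x <;> simp [remove_two_way_redundancy_alt_pass1, pvFirstAt?, Option.orElse, h]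
  | cons c rest ih =>
    have hc := hpre c (List.mem_cons_self ..)
    unfold pvRev? at hc
    cases hsp : PySem.Str.split? c "-to-" with
    | none => rw [hsp] at hc; simp at hc
    | some parts =>
      rw [hsp] at hc
      match parts, hc with
      | [s1, s2], _ =>
        simp only [remove_two_way_redundancy_alt_pass1, hsp]
        rw [ih (i + 1) _ _ (fun d hd => hpre d (List.mem_cons_of_mem _ hd))]
        by_cases hx : x = c
        · rw [hx, PySem.Dict.get?_setdefault_self]
          cases f.get? c <;> simp [pvFirstAt?, Option.orElse]
        · rw [PySem.Dict.get?_setdefault_of_ne f i hx]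
          simp [pvFirstAt?, beq_iff_eq, Ne.symm hx]

-- pass1's second dict: get? x = first index whose reverse form is x
lemma pass1_snd_get (l : List String) (i : Int) (f fr : PySem.Dict String Int)
    (hpre : ∀ c ∈ l, (pvRev? c).isSome) (x : String) :
    ((remove_two_way_redundancy_alt_pass1 l i f fr).2).get? x =
      (fr.get? x).orElse (fun _ => pvFirstAt? (fun d => pvRev? d == some x) l i) := by
  induction l generalizing i f fr with
  | nil => cases h : fr.get? x <;> simp [remove_two_way_redundancy_alt_pass1, pvFirstAt?, Option.orElse, h]
  | cons c rest ih =>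
    have hc := hpre c (List.mem_cons_self ..)
    unfold pvRev? at hc
    cases hsp : PySem.Str.split? c "-to-" with
    | none => rw [hsp] at hc; simp at hc
    | some parts =>
      rw [hsp] at hc
      match parts, hc with
      | [s1, s2], _ =>
        have hrev : pvRev? c = some (s2 ++ "-to-" ++ s1) := by unfold pvRev?; rw [hsp]
        simp only [remove_two_way_redundancy_alt_pass1, hsp]
        rw [ih (i + 1) _ _ (fun d hd => hpre d (List.mem_cons_of_mem _ hd))]
        by_cases hx : x = s2 ++ "-to-" ++ s1
        · rw [hx, PySem.Dict.get?_setdefault_self]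
          cases fr.get? (s2 ++ "-to-" ++ s1) <;> simp [pvFirstAt?, hrev, Option.orElse]
        · rw [PySem.Dict.get?_setdefault_of_ne fr i hx]
          simp [pvFirstAt?, hrev, beq_iff_eq, Ne.symm hx]

-- B's pass2 over the full-list dicts equals pvRef
lemma pass2_eq_ref (L : List String) (f fr : PySem.Dict String Int)
    (Hf : ∀ x, f.get? x = pvFirstAt? (· == x) L 0)
    (Hfr : ∀ x, fr.get? x = pvFirstAt? (fun d => pvRev? d == some x) L 0)
    (l P : List String) (hL : L = P.reverse ++ l)
    (hpre : ∀ c ∈ l, (pvRev? c).isSome) :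
    remove_two_way_redundancy_alt_pass2 f fr l (P.length : Int) = pvRef P l := by
  induction l generalizing P with
  | nil => rfl
  | cons c rest ih =>
    have hlen : (0 : Int) + (P.reverse.length : Int) = (P.length : Int) := by simp
    have hf := Hf c
    rw [hL, pvFirstAt?_append, hlen] at hf
    have hfr := Hfr c
    rw [hL, pvFirstAt?_append, hlen] at hfr
    simp only [pvFirstAt?, BEq.rfl, if_true] at hf
    have hrec : remove_two_way_redundancy_alt_pass2 f fr rest ((P.length : Int) + 1) =
        pvRef (c :: P) rest := by
      have := ih (c :: P) (by rw [hL]; simp)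
        (fun d hd => hpre d (List.mem_cons_of_mem _ hd))
      simpa using this
    by_cases hmem : c ∈ P
    · -- an earlier equal comparison: first[c] < i, not emitted
      cases hfa : pvFirstAt? (· == c) P.reverse 0 with
      | none =>
        rw [pvFirstAt?_eq_none_iff] at hfa
        have := hfa c (List.mem_reverse.mpr hmem)
        simp at this
      | some k =>
        rw [hfa] at hf
        have hk : k < (P.length : Int) := by
          have := pvFirstAt?_lt _ _ _ _ hfa
          simpa using this
        have hne : (k == (P.length : Int)) = false := by
          simp only [beq_eq_false_iff_ne, ne_eq]
          omega
        have hcond : pvCond P c = false := by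
          rw [Bool.eq_false_iff]
          intro h
          simp only [pvCond, List.all_eq_true, Bool.and_eq_true, Bool.not_eq_eq_eq_not,
            Bool.not_true, beq_eq_false_iff_ne, ne_eq] at h
          exact (h c hmem).1 rfl
        simp only [remove_two_way_redundancy_alt_pass2, hf, Option.orElse, hne,
          Bool.false_and, if_false, pvRef, hcond, Bool.false_eq_true, List.nil_append]
        exact hrec
    · have hfa : pvFirstAt? (· == c) P.reverse 0 = none := by
        rw [pvFirstAt?_eq_none_iff]
        intro d hd
        simp only [beq_eq_false_iff_ne, ne_eq]
        intro he
        exact hmem (he ▸ List.mem_reverse.mp hd)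
      rw [hfa] at hf
      simp only [Option.orElse] at hf
      by_cases hrmem : ∃ d ∈ P, pvRev? d = some c
      · -- an earlier reverse comparison: first_rev[c] < i, not emitted
        cases hfar : pvFirstAt? (fun d => pvRev? d == some c) P.reverse 0 with
        | none =>
          rw [pvFirstAt?_eq_none_iff] at hfar
          obtain ⟨d, hd, hdr⟩ := hrmem
          have := hfar d (List.mem_reverse.mpr hd)
          simp [hdr] at this
        | some k =>
          rw [hfar] at hfr
          have hk : k < (P.length : Int) := by
            have := pvFirstAt?_lt _ _ _ _ hfar
            simpa using this
          have hgd : fr.getD c (P.length : Int) = k := by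
            rw [PySem.Dict.getD_eq_get?_getD, hfr]
            rfl
          have hcond : pvCond P c = false := by
            rw [Bool.eq_false_iff]
            intro h
            simp only [pvCond, List.all_eq_true, Bool.and_eq_true, Bool.not_eq_eq_eq_not,
              Bool.not_true, beq_eq_false_iff_ne, ne_eq] at h
            obtain ⟨d, hd, hdr⟩ := hrmem
            exact (h d hd).2 hdr
          have hdec : decide (fr.getD c (P.length : Int) ≥ (P.length : Int)) = false := by
            rw [hgd]
            simp only [ge_iff_le, decide_eq_false_iff_not, not_le]
            omega
          simp only [remove_two_way_redundancy_alt_pass2, hf, hdec, Bool.and_false, if_false,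
            pvRef, hcond, Bool.false_eq_true, List.nil_append]
          exact hrec
      · -- no earlier equal or reverse comparison: emitted
        have hfar : pvFirstAt? (fun d => pvRev? d == some c) P.reverse 0 = none := by
          rw [pvFirstAt?_eq_none_iff]
          intro d hd
          simp only [beq_eq_false_iff_ne, ne_eq]
          exact fun he => hrmem ⟨d, List.mem_reverse.mp hd, he⟩
        rw [hfar] at hfr
        simp only [Option.orElse] at hfr
        have hge : fr.getD c (P.length : Int) ≥ (P.length : Int) := by
          rw [PySem.Dict.getD_eq_get?_getD, hfr]
          cases h2 : pvFirstAt? (fun d => pvRev? d == some c) (c :: rest)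
              ((P.length : Nat) : Int) with
          | none => simp
          | some k => simpa using pvFirstAt?_ge _ _ _ _ h2
        have hcond : pvCond P c = true := by
          simp only [pvCond, List.all_eq_true, Bool.and_eq_true, Bool.not_eq_eq_eq_not,
            Bool.not_true, beq_eq_false_iff_ne, ne_eq]
          intro d hd
          exact ⟨fun he => hmem (he ▸ hd), fun he => hrmem ⟨d, hd, he⟩⟩
        simp only [remove_two_way_redundancy_alt_pass2, hf, BEq.rfl, Bool.true_and,
          ge_iff_le, hge, decide_eq_true_eq, if_true, pvRef, hcond,
          List.cons_append, List.nil_append]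
        rw [hrec]

-- ===== VERDICT (by name: the statement is the Claim_ definition above) =====
theorem remove_two_way_redundancy_spec : Claim_equal_remove_two_way_redundancy := by
  intro L _ hpre2
  have hpre : ∀ c ∈ L, (pvRev? c).isSome := by
    intro c hc
    have h2 := hpre2 c hc
    unfold pvRev?
    cases h : PySem.Str.split? c "-to-" with
    | none => rw [h] at h2; simp at h2
    | some parts =>
      rw [h] at h2
      match parts, h2 with
      | [s1, s2], _ => simp
  unfold Spec_remove_two_way_redundancy remove_two_way_redundancy remove_two_way_redundancy_alt
  have hA : remove_two_way_redundancy_go (PySem.Set.ofList L) [] L = pvRef [] L := by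
    apply goA_eq_ref L [] _ _ hpre
    intro x hx
    simp [PySem.Set.mem_ofList, hx, pvCond]
  have hB : remove_two_way_redundancy_alt_pass2
      (remove_two_way_redundancy_alt_pass1 L 0 PySem.Dict.empty PySem.Dict.empty).1
      (remove_two_way_redundancy_alt_pass1 L 0 PySem.Dict.empty PySem.Dict.empty).2 L 0 =
      pvRef [] L := by
    have := pass2_eq_ref L
      (remove_two_way_redundancy_alt_pass1 L 0 PySem.Dict.empty PySem.Dict.empty).1
      (remove_two_way_redundancy_alt_pass1 L 0 PySem.Dict.empty PySem.Dict.empty).2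
      (fun x => by rw [pass1_fst_get L 0 _ _ hpre x]; simp [Option.orElse])
      (fun x => by rw [pass1_snd_get L 0 _ _ hpre x]; simp [Option.orElse])
      L [] (by simp) hpre
    simpa using this
  rw [hA]; exact hB.symm
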